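-- pv_equiv track=rewrite | github.com/dna-storage/framed | dnastorage/codec/base_conversion.py | convertQuarnaryHelper
-- ===== SOURCE A (Python) =====
-- bases = ['A', 'C', 'G', 'T']
--
-- def convertQuarnaryHelper(dec,s):
--     m = dec % 4
--     q = dec // 4
--     s = s + bases[m]
--     if q > 0:
--         return convertQuarnaryHelper(q,s)
--     else:
--         return s
-- ===== SOURCE B (Python) =====
-- bases = ['A', 'C', 'G', 'T']
--
-- def convertQuarnaryHelper(dec, s):
--     if dec <= 0:
--         return s + bases[dec % 4]
--     k = 1
--     while 4 ** k <= dec: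
--         k += 1
--     return s + ''.join(bases[(dec // 4 ** i) % 4] for i in range(k))
-- ===== Notes on version B (the rewrite author's own statement) =====
-- stated objective: alternative
-- what changed: Replaced A's digit-by-digit recursion (which threads a growing accumulator string) by a positional formula: B first counts the number k of base-4 digits with a power loop, then reads each digit independently as bases[(dec // 4**i) % 4] for i in range(k) and joins them once onto s; dec <= 0 is the explicit one-digit case.
import Mathlib
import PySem

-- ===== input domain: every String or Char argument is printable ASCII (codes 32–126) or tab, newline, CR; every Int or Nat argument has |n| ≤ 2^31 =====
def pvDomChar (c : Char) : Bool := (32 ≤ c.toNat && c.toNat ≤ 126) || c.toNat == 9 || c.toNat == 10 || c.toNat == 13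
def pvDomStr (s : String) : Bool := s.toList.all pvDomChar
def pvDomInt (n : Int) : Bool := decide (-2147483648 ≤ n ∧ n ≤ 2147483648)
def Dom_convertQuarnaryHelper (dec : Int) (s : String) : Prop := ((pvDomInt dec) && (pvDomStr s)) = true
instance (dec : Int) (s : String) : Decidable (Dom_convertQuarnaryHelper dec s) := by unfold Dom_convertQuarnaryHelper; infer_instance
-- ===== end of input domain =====

-- B replaces A's digit-by-digit recursion with a positional formula: it first counts the
-- number of base-4 digits k, then reads each digit directly as (dec // 4**i) % 4 for
-- i in range(k) (objective: alternative algorithm, no threaded accumulator/state).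

-- ===== PORT A =====
def basesA : List String := ["A", "C", "G", "T"]

-- literal port of A's recursion: m = dec % 4, q = dec // 4, s = s + bases[m], recurse if q > 0
def convertQuarnaryHelper (dec : Int) (s : String) : String :=
  let m := PySem.Int.mod dec 4
  let q := PySem.Int.floordiv dec 4
  let s2 := s ++ ((PySem.List.pyGet? basesA m).getD "")
  if q > 0 then convertQuarnaryHelper q s2 else s2
termination_by dec.toNat
decreasing_by
  rename_i h
  have h' : PySem.Int.floordiv dec 4 > 0 := h
  rw [PySem.Int.floordiv_eq_ediv_of_pos (by norm_num : (0:Int) < 4)] at h' ⊢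
  omega

-- ===== PORT B =====
def basesB : List String := ["A", "C", "G", "T"]

-- the digit-count loop of Source B: k = 1; while 4 ** k <= dec: k += 1
def kloopB (dec : Int) (k : Nat) : Nat :=
  if (4:Int) ^ k ≤ dec then kloopB dec (k + 1) else k
termination_by dec.toNat - k
decreasing_by
  rename_i h
  have hk : k < 4 ^ k := Nat.lt_pow_self (by norm_num : 1 < 4)
  have h4 : ((4 ^ k : Nat) : Int) = (4:Int) ^ k := by push_cast; ring
  rw [← h4] at h
  omega

-- Source B: dec <= 0 branch returns s + bases[dec % 4]; otherwise count digits, then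
-- join bases[(dec // 4 ** i) % 4] over i in range(k).  (4 ** i is ported as
-- (4:Int) ^ i.toNat — exact since every i produced by range(k) is nonnegative.)
def convertQuarnaryHelper_alt (dec : Int) (s : String) : String :=
  if dec ≤ 0 then
    s ++ ((PySem.List.pyGet? basesB (PySem.Int.mod dec 4)).getD "")
  else
    s ++ String.join ((PySem.List.pyRange 0 (kloopB dec 1) 1).map
      (fun i => (PySem.List.pyGet? basesB
        (PySem.Int.mod (PySem.Int.floordiv dec ((4:Int) ^ i.toNat)) 4)).getD ""))

-- ===== PRECONDITION & SPEC =====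
def Spec_convertQuarnaryHelper (dec : Int) (s : String) (out : String) : Prop := out = convertQuarnaryHelper_alt dec s
instance (dec : Int) (s : String) (out : String) : Decidable (Spec_convertQuarnaryHelper dec s out) := by unfold Spec_convertQuarnaryHelper; infer_instance

-- ===== CLAIM (what is proved, stated in full; the proofs are below) =====
def Claim_equal_convertQuarnaryHelper : Prop := ∀ (dec : Int) (s : String), Dom_convertQuarnaryHelper dec s → Spec_convertQuarnaryHelper dec s (convertQuarnaryHelper dec s)

-- ===== LEMMAS AND PROOFS =====

-- the single digit string bases[n % 4]
def digS (n : Int) : String := (PySem.List.pyGet? basesB (PySem.Int.mod n 4)).getD ""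

-- B's joined digit list, on the List.range side
def joinDig (dec : Int) (k : Nat) : String :=
  String.join ((List.range k).map (fun n => digS (PySem.Int.floordiv dec ((4:Int) ^ n))))

theorem pvFour_pos : (0:Int) < 4 := by norm_num

theorem foldl_append_init (L : List String) (a : String) :
    List.foldl (fun r s => r ++ s) a L = a ++ List.foldl (fun r s => r ++ s) "" L := by
  induction L generalizing a with
  | nil => simp
  | cons x xs ih =>
    simp only [List.foldl]
    rw [ih (a ++ x), ih ("" ++ x)]
    simp [String.append_assoc]

theorem join_cons (x : String) (L : List String) :
    String.join (x :: L) = x ++ String.join L := by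
  simp only [String.join, List.foldl]
  rw [foldl_append_init]
  simp

-- B's port maps over pyRange; same thing over List.range
theorem alt_eq_joinDig (dec : Int) (h : 0 < dec) :
    convertQuarnaryHelper_alt dec s = s ++ joinDig dec (kloopB dec 1) := by
  unfold convertQuarnaryHelper_alt joinDig digS
  rw [if_neg (by omega), PySem.List.pyRange_one]
  simp [List.map_map, Function.comp_def]

-- digit i+1 of dec is digit i of dec // 4
theorem floordiv_shift (dec : Int) (n : Nat) :
    PySem.Int.floordiv dec ((4:Int) ^ (n + 1))
      = PySem.Int.floordiv (PySem.Int.floordiv dec 4) ((4:Int) ^ n) := by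
  rw [PySem.Int.floordiv_eq_ediv_of_pos (by positivity),
      PySem.Int.floordiv_eq_ediv_of_pos pvFour_pos,
      PySem.Int.floordiv_eq_ediv_of_pos (by positivity),
      Int.ediv_ediv_of_nonneg, pow_succ']
  norm_num

theorem joinDig_succ (dec : Int) (k : Nat) :
    joinDig dec (k + 1)
      = digS dec ++ joinDig (PySem.Int.floordiv dec 4) k := by
  unfold joinDig
  rw [List.range_succ_eq_map, List.map_cons, join_cons, List.map_map]
  congr 1
  · rw [pow_zero, PySem.Int.floordiv_eq_ediv_of_pos (by norm_num : (0:Int) < 1), Int.ediv_one]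
  · congr 1
    apply List.map_congr_left
    intro n _
    simp only [Function.comp_def, Nat.succ_eq_add_one]
    exact congrArg digS (floordiv_shift dec n)

-- the digit-count loop shifts by one when dec ≥ 4
theorem pow_le_ediv_iff (dec : Int) (k : Nat) :
    ((4:Int) ^ k ≤ dec / 4) ↔ ((4:Int) ^ (k + 1) ≤ dec) := by
  rw [Int.le_ediv_iff_mul_le pvFour_pos, pow_succ]

theorem nat_lt_pow_int (k : Nat) : (k : Int) < (4:Int) ^ k :=
  by exact_mod_cast Nat.lt_pow_self (by norm_num : 1 < 4) (n := k)

theorem kloop_shift (fuel : Nat) (dec : Int) (hdec : 4 ≤ dec) (k : Nat)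
    (hn : dec.toNat ≤ fuel + k) :
    kloopB dec (k + 1) = kloopB (PySem.Int.floordiv dec 4) k + 1 := by
  induction fuel generalizing k with
  | zero =>
    have hk : (k : Int) < (4:Int) ^ k := nat_lt_pow_int k
    have hpow : (4:Int) ^ k ≤ (4:Int) ^ (k + 1) :=
      pow_le_pow_right₀ (by norm_num) (by omega)
    have hbig : ¬ ((4:Int) ^ (k + 1) ≤ dec) := by omega
    rw [PySem.Int.floordiv_eq_ediv_of_pos pvFour_pos]
    conv_lhs => rw [kloopB]
    conv_rhs => rw [kloopB]
    rw [if_neg hbig, if_neg (fun h => hbig ((pow_le_ediv_iff dec k).mp h))]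
  | succ fuel ih =>
    rw [PySem.Int.floordiv_eq_ediv_of_pos pvFour_pos]
    conv_lhs => rw [kloopB]
    conv_rhs => rw [kloopB]
    by_cases hc : (4:Int) ^ k ≤ dec / 4
    · rw [if_pos hc, if_pos ((pow_le_ediv_iff dec k).mp hc)]
      have := ih (k + 1) (by omega)
      rw [PySem.Int.floordiv_eq_ediv_of_pos pvFour_pos] at this
      exact this
    · rw [if_neg hc, if_neg (fun h => hc ((pow_le_ediv_iff dec k).mpr h))]

-- small dec (0 < dec < 4): B emits exactly one digit
theorem alt_small (dec : Int) (h0 : 0 < dec) (h4 : dec < 4) (s : String) :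
    convertQuarnaryHelper_alt dec s = s ++ digS dec := by
  rw [alt_eq_joinDig dec h0]
  have hk : kloopB dec 1 = 1 := by rw [kloopB]; rw [if_neg (by norm_num; omega)]
  rw [hk]
  unfold joinDig
  simp [List.range_succ, String.join]

theorem kloop_pos (dec : Int) (h : 0 < dec) : kloopB dec 0 = kloopB dec 1 := by
  rw [kloopB]; rw [if_pos (by norm_num; omega)]

theorem main_eq (fuel : Nat) (dec : Int) (hn : dec.toNat ≤ fuel) (s : String) :
    convertQuarnaryHelper dec s = convertQuarnaryHelper_alt dec s := by
  induction fuel generalizing dec s with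
  | zero =>
    -- dec ≤ 0
    have hd : dec ≤ 0 := by omega
    rw [convertQuarnaryHelper, convertQuarnaryHelper_alt]
    have hq : PySem.Int.floordiv dec 4 ≤ 0 := by
      rw [PySem.Int.floordiv_eq_ediv_of_pos pvFour_pos]
      have := Int.ediv_le_ediv pvFour_pos hd
      simpa using this
    rw [if_neg (by omega), if_pos hd]
    simp [basesA, basesB]
  | succ fuel ih =>
    rw [convertQuarnaryHelper]
    by_cases hd : dec ≤ 0
    · have hq : PySem.Int.floordiv dec 4 ≤ 0 := by
        rw [PySem.Int.floordiv_eq_ediv_of_pos pvFour_pos]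
        have := Int.ediv_le_ediv pvFour_pos hd
        simpa using this
      rw [convertQuarnaryHelper_alt, if_neg (by omega), if_pos hd]
      simp [basesA, basesB]
    · have hd' : 0 < dec := by omega
      by_cases h4 : dec < 4
      · have hq : PySem.Int.floordiv dec 4 = 0 := by
          rw [PySem.Int.floordiv_eq_ediv_of_pos pvFour_pos]
          omega
        rw [if_neg (by omega), alt_small dec hd' h4]
        simp [digS, basesA, basesB]
      · -- dec ≥ 4
        have h4' : (4:Int) ≤ dec := by omega
        have hqpos : 0 < PySem.Int.floordiv dec 4 := by
          rw [PySem.Int.floordiv_eq_ediv_of_pos pvFour_pos]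
          omega
        have hqlt : (PySem.Int.floordiv dec 4).toNat ≤ fuel := by
          rw [PySem.Int.floordiv_eq_ediv_of_pos pvFour_pos]
          omega
        rw [if_pos hqpos, ih _ hqlt,
            alt_eq_joinDig _ hqpos, alt_eq_joinDig dec hd']
        have hks : kloopB dec 1 = kloopB (PySem.Int.floordiv dec 4) 1 + 1 := by
          rw [kloop_shift dec.toNat dec h4' 0 (by omega), kloop_pos _ hqpos]
        rw [hks, joinDig_succ]
        simp [digS, basesA, basesB, String.append_assoc]

-- ===== VERDICT (by name: the statement is the Claim_ definition above) =====
theorem convertQuarnaryHelper_spec : Claim_equal_convertQuarnaryHelper := by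
  intro dec s _
  unfold Spec_convertQuarnaryHelper
  exact main_eq dec.toNat dec le_rfl s
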